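-- pv_equiv track=rewrite | github.com/kz04px/4ku | minifier/minify.py | collect_chunks
-- ===== SOURCE A (Python) =====
-- def collect_chunks(tokens: list, start: list, end: list, include_end: bool = True):
--     new = []
--
--     i = 0
--     while i < len(tokens):
--         j = i + 1
--
--         if (i + len(start) <= len(tokens)) and (start == tokens[i : i + len(start)]):
--             for n in range(j + len(start) - 1, len(tokens) - len(end) + 1):
--                 if end == tokens[n : n + len(end)]:
--                     j = n + len(end) if include_end else n
--                     break
--
--         new.append("".join(tokens[i:j]))
--
--         assert j > i
--         i = j
--
--     return new
-- ===== SOURCE B (Python) =====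
-- def collect_chunks(tokens: list, start: list, end: list, include_end: bool = True):
--     # Precompute all positions where `end` matches, once; then advance a single
--     # monotone pointer over them instead of rescanning after every start match.
--     L, ls, le = len(tokens), len(start), len(end)
--     ends = [n for n in range(L - le + 1) if end == tokens[n : n + le]]
--     new = []
--     i = 0
--     k = 0  # pointer into ends; only ever moves forward
--     while i < L:
--         j = i + 1
--         if i + ls <= L and start == tokens[i : i + ls]:
--             while k < len(ends) and ends[k] < i + ls:
--                 k += 1
--             if k < len(ends):
--                 j = ends[k] + le if include_end else ends[k]
--         new.append("".join(tokens[i:j]))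
--         i = j
--     return new
-- ===== Notes on version B (the rewrite author's own statement) =====
-- stated objective: alternative
-- what changed: B precomputes the list of all end-pattern match positions once and advances a single monotone pointer over it per chunk, replacing A's per-chunk rescan of the whole tail for the end pattern; Pre_ excludes only the inputs on which A raises AssertionError (tokens nonempty, start == [], with end == [] or include_end false and end matching somewhere).
import Mathlib
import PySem

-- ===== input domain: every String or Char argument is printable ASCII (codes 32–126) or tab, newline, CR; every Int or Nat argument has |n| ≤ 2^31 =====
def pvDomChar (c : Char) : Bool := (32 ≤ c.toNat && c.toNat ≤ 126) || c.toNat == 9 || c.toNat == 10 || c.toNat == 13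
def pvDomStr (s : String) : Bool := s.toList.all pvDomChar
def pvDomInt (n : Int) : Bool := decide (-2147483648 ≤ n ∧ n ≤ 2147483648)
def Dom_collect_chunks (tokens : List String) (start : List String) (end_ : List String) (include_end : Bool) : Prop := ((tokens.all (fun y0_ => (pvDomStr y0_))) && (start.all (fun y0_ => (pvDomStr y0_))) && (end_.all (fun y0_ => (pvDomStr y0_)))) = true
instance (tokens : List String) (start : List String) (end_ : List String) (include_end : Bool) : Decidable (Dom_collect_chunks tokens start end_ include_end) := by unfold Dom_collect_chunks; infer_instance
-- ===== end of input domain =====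

-- B replaces A's per-chunk rescan for the end pattern by one precomputed list of end-match
-- positions and a monotone pointer into it, so no per-chunk rescan remains (objective: alternative).

-- ===== PORT A =====
-- while loop of A as fuel recursion (fuel = len(tokens) suffices: i grows by ≥ 1 per step on
-- every input Pre_ admits); Python's `assert j > i` fires only outside Pre_collect_chunks
-- (there Python raises AssertionError; the port keeps looping until the fuel runs out).
def collect_chunks_goA (tokens : List String) (start : List String) (end_ : List String)
    (include_end : Bool) (fuel : Nat) (i : Nat) (new : List String) : List String :=
  match fuel with
  | 0 => new
  | fuel + 1 =>
    if i < tokens.length then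
      -- j = i + 1; overwritten when `start` matches at i and `end` matches somewhere after
      let j : Nat :=
        if i + start.length ≤ tokens.length ∧
            start = PySem.List.slice tokens (some (i : Int)) (some ((i : Int) + start.length)) then
          -- for n in range(j + len(start) - 1, len(tokens) - len(end) + 1): first end match
          match (PySem.List.pyRange ((i : Int) + start.length)
                  ((tokens.length : Int) - end_.length + 1) 1).find?
                (fun n => end_ == PySem.List.slice tokens (some n) (some (n + end_.length))) with
          | some n => if include_end then (n + end_.length).toNat else n.toNat
          | none => i + 1
        else i + 1
      collect_chunks_goA tokens start end_ include_end fuel j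
        (new ++ [PySem.Str.join "" (PySem.List.slice tokens (some (i : Int)) (some (j : Int)))])
    else new

def collect_chunks (tokens : List String) (start : List String) (end_ : List String)
    (include_end : Bool) : List String :=
  collect_chunks_goA tokens start end_ include_end tokens.length 0 []

-- ===== PORT B =====
-- ends = [n for n in range(len(tokens) - len(end) + 1) if end == tokens[n : n + len(end)]]
def collect_chunks_ends (tokens : List String) (end_ : List String) : List Int :=
  (PySem.List.pyRange 0 ((tokens.length : Int) - end_.length + 1) 1).filter
    (fun n => end_ == PySem.List.slice tokens (some n) (some (n + end_.length)))

-- B's while loop; the forward-only pointer k into `ends` is modelled by the remaining suffix ks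
-- (the inner `while ends[k] < i + len(start): k += 1` is the dropWhile).
def collect_chunks_goB (tokens : List String) (start : List String) (end_ : List String)
    (include_end : Bool) (fuel : Nat) (i : Nat) (ks : List Int) (new : List String) : List String :=
  match fuel with
  | 0 => new
  | fuel + 1 =>
    if i < tokens.length then
      if i + start.length ≤ tokens.length ∧
          start = PySem.List.slice tokens (some (i : Int)) (some ((i : Int) + start.length)) then
        let ks' := ks.dropWhile (fun n => n < (i : Int) + start.length)
        let j : Nat :=
          match ks'.head? with
          | some n => if include_end then (n + end_.length).toNat else n.toNat
          | none => i + 1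
        collect_chunks_goB tokens start end_ include_end fuel j ks'
          (new ++ [PySem.Str.join "" (PySem.List.slice tokens (some (i : Int)) (some (j : Int)))])
      else
        collect_chunks_goB tokens start end_ include_end fuel (i + 1) ks
          (new ++ [PySem.Str.join "" (PySem.List.slice tokens (some (i : Int)) (some ((i + 1 : Nat) : Int)))])
    else new

def collect_chunks_alt (tokens : List String) (start : List String) (end_ : List String)
    (include_end : Bool) : List String :=
  collect_chunks_goB tokens start end_ include_end tokens.length 0
    (collect_chunks_ends tokens end_) []

-- ===== PRECONDITION & SPEC =====
-- Pre_ excludes exactly the inputs on which Python A raises AssertionError (assert j > i):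
-- tokens nonempty with start == [] and either end == [], or include_end false while the end
-- pattern matches somewhere in tokens.  A returns normally on every other input.
def Pre_collect_chunks (tokens : List String) (start : List String) (end_ : List String) (include_end : Bool) : Prop :=
  ¬ (tokens ≠ [] ∧ start = [] ∧
      (end_ = [] ∨ (include_end = false ∧
        ∃ n < tokens.length, end_ = (tokens.drop n).take end_.length)))
instance (tokens : List String) (start : List String) (end_ : List String) (include_end : Bool) : Decidable (Pre_collect_chunks tokens start end_ include_end) := by unfold Pre_collect_chunks; infer_instance

def pvWitness_collect_chunks : List String × List String × List String × Bool :=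
  (["fn", "(", "a", ")", ";"], ["("], [")"], true)

def Spec_collect_chunks (tokens : List String) (start : List String) (end_ : List String) (include_end : Bool) (out : List String) : Prop := out = collect_chunks_alt tokens start end_ include_end
instance (tokens : List String) (start : List String) (end_ : List String) (include_end : Bool) (out : List String) : Decidable (Spec_collect_chunks tokens start end_ include_end out) := by unfold Spec_collect_chunks; infer_instance

-- ===== CLAIM (what is proved, stated in full; the proofs are below) =====
def Claim_equal_collect_chunks : Prop := ∀ (tokens : List String) (start : List String) (end_ : List String) (include_end : Bool), Dom_collect_chunks tokens start end_ include_end → Pre_collect_chunks tokens start end_ include_end → Spec_collect_chunks tokens start end_ include_end (collect_chunks tokens start end_ include_end)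

-- ===== LEMMAS AND PROOFS =====

-- dropping twice with a weaker predicate first is dropping once
lemma dropWhile_dropWhile_of_imp {α : Type} (p q : α → Bool) (l : List α)
    (h : ∀ x, p x = true → q x = true) :
    (l.dropWhile p).dropWhile q = l.dropWhile q := by
  induction l with
  | nil => rfl
  | cons x t ih =>
    by_cases hp : p x = true
    · simp [hp, h x hp, ih]
    · simp [List.dropWhile_cons, hp]

-- the head surviving a dropWhile refutes the predicate
lemma head?_dropWhile_false {α : Type} (p : α → Bool) (l : List α) (a : α)
    (h : (l.dropWhile p).head? = some a) : p a = false := by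
  induction l with
  | nil => simp at h
  | cons x t ih =>
    by_cases hp : p x = true
    · rw [List.dropWhile_cons_of_pos hp] at h; exact ih h
    · rw [List.dropWhile_cons_of_neg hp] at h
      simp only [List.head?_cons, Option.some.injEq] at h
      subst h
      simpa using hp

-- dropping the below-lo prefix of range(a, b) is range(lo, b)
lemma dropWhile_pyRange (k : Nat) : ∀ (a b lo : Int), (b - a).toNat = k → a ≤ lo →
    (PySem.List.pyRange a b 1).dropWhile (fun n => n < lo) = PySem.List.pyRange lo b 1 := by
  induction k with
  | zero =>
    intro a b lo hk h
    have hba : b ≤ a := by omega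
    rw [PySem.List.pyRange_one_eq_nil hba, PySem.List.pyRange_one_eq_nil (le_trans hba h)]
    rfl
  | succ k ih =>
    intro a b lo hk h
    have hab : a < b := by omega
    rw [PySem.List.pyRange_one_cons hab]
    by_cases hx : a < lo
    · rw [List.dropWhile_cons_of_pos (by simpa using hx)]
      exact ih (a + 1) b lo (by omega) (by omega)
    · have : a = lo := by omega
      subst this
      rw [List.dropWhile_cons_of_neg (by simp)]
      rw [← PySem.List.pyRange_one_cons hab]

-- the first match at or beyond lo, read off the pre-filtered sorted list
lemma find?_dropWhile_eq_head? (p : Int → Bool) (lo : Int) :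
    ∀ (l : List Int), l.Pairwise (· ≤ ·) →
    (l.dropWhile (fun n => n < lo)).find? p
      = ((l.filter p).dropWhile (fun n => n < lo)).head? := by
  intro l
  induction l with
  | nil => intro _; rfl
  | cons x t ih =>
    intro hpw
    rw [List.pairwise_cons] at hpw
    obtain ⟨hx, ht⟩ := hpw
    by_cases hlt : x < lo
    · by_cases px : p x = true
      · simp only [List.dropWhile_cons, List.filter_cons, px, decide_eq_true_eq, if_pos hlt]
        simpa [hlt] using ih ht
      · simp only [List.dropWhile_cons, List.filter_cons, px]
        simpa [hlt, px] using ih ht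
    · rw [List.dropWhile_cons_of_neg (by simpa using hlt)]
      by_cases px : p x = true
      · rw [List.find?_cons_of_pos px, List.filter_cons_of_pos px,
          List.dropWhile_cons_of_neg (by simpa using hlt)]
        rfl
      · rw [List.find?_cons_of_neg px, List.filter_cons_of_neg px]
        cases hfil : t.filter p with
        | nil => simp [hfil, ← List.head?_filter]
        | cons y ys =>
          have hy : y ∈ t := List.mem_of_mem_filter (hfil ▸ List.mem_cons_self)
          have : ¬ (y < lo) := by have := hx y hy; omega
          rw [List.dropWhile_cons_of_neg (by simpa using this)]
          rw [← List.head?_filter, hfil]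

-- main loop alignment: ks behaves, beyond i + len(start), like the full ends list
lemma goA_eq_goB (tokens : List String) (start : List String) (end_ : List String)
    (include_end : Bool) :
    ∀ (fuel : Nat) (i : Nat) (ks : List Int) (new : List String),
    (∀ lo : Int, (i : Int) + start.length ≤ lo →
        ks.dropWhile (fun n => n < lo)
          = (collect_chunks_ends tokens end_).dropWhile (fun n => n < lo)) →
    collect_chunks_goA tokens start end_ include_end fuel i new
      = collect_chunks_goB tokens start end_ include_end fuel i ks new := by
  intro fuel
  induction fuel with
  | zero => intro i ks new _; rfl
  | succ fuel ih =>
    intro i ks new hinv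
    simp only [collect_chunks_goA, collect_chunks_goB]
    by_cases hi : i < tokens.length
    · rw [if_pos hi, if_pos hi]
      by_cases hC : i + start.length ≤ tokens.length ∧
          start = PySem.List.slice tokens (some (i : Int)) (some ((i : Int) + start.length))
      · rw [if_pos hC, if_pos hC]
        -- identify A's inner search with the head of B's advanced pointer list
        have hrange : (PySem.List.pyRange ((i : Int) + start.length)
              ((tokens.length : Int) - end_.length + 1) 1).find?
              (fun n => end_ == PySem.List.slice tokens (some n) (some (n + end_.length)))
            = (ks.dropWhile (fun n => n < (i : Int) + start.length)).head? := by
          rw [hinv ((i : Int) + start.length) (le_refl _)]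
          rw [← dropWhile_pyRange ((tokens.length : Int) - end_.length + 1 - 0).toNat 0
                ((tokens.length : Int) - end_.length + 1) ((i : Int) + start.length) rfl
                (by positivity)]
          exact find?_dropWhile_eq_head? _ _ _
            ((PySem.List.pairwise_lt_pyRange_one 0 _).imp (fun h => le_of_lt h))
        rw [hrange]
        -- both sides now step to the same j
        cases hh : (ks.dropWhile (fun n => n < (i : Int) + start.length)).head? with
        | none =>
          exact ih (i + 1) (ks.dropWhile (fun n => n < (i : Int) + start.length)) _
            (fun lo hlo => by
              rw [dropWhile_dropWhile_of_imp _ _ ks (fun x hx => by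
                simp only [decide_eq_true_eq] at hx ⊢; omega)]
              exact hinv lo (by omega))
        | some n =>
          have hn : ((i : Int) + start.length ≤ n) := by
            have := head?_dropWhile_false _ ks n hh
            simp only [decide_eq_false_iff_not, not_lt] at this
            exact this
          refine ih (if include_end = true then (n + (end_.length : Int)).toNat else n.toNat)
              (ks.dropWhile (fun n => n < (i : Int) + start.length)) _ (fun lo hlo => ?_)
          have hij : (i : Int)
              ≤ (((if include_end = true then (n + (end_.length : Int)).toNat else n.toNat) : Nat) : Int) := by
            split <;> omega
          have h2 : (i : Int) + (start.length : Int) ≤ lo := by omega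
          rw [dropWhile_dropWhile_of_imp _ _ ks (fun x hx => by
            simp only [decide_eq_true_eq] at hx ⊢; omega)]
          exact hinv lo h2
      · rw [if_neg hC, if_neg hC]
        exact ih (i + 1) ks _ (fun lo hlo => hinv lo (by omega))
    · rw [if_neg hi, if_neg hi]
-- ===== VERDICT (by name: the statement is the Claim_ definition above) =====
theorem collect_chunks_spec : Claim_equal_collect_chunks := by
  intro tokens start end_ include_end _ _
  unfold Spec_collect_chunks collect_chunks collect_chunks_alt
  exact goA_eq_goB tokens start end_ include_end tokens.length 0
    (collect_chunks_ends tokens end_) [] (fun lo _ => rfl)
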